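-- pv_equiv track=rewrite | github.com/dekasashanka07-ux/document_gorunded_assistant | document_assistant.py | _is_negative_response
-- ===== SOURCE A (Python) =====
-- def _is_negative_response(answer: str) -> bool:
--     """Detect responses where the LLM signals it couldn't find information."""
--     negative_phrases = [
--         "not covered", "not mentioned", "no information",
--         "cannot find", "not available", "not provided",
--         "does not contain", "i don't know", "i do not know",
--         "not found in", "outside the scope",
--     ]
--     lowered = answer.strip().lower()
--     return any(phrase in lowered for phrase in negative_phrases)
-- ===== SOURCE B (Python) =====
-- def _is_negative_response(answer: str) -> bool:
--     """Detect responses where the LLM signals it couldn't find information."""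
--     negative_phrases = [
--         "not covered", "not mentioned", "no information",
--         "cannot find", "not available", "not provided",
--         "does not contain", "i don't know", "i do not know",
--         "not found in", "outside the scope",
--     ]
--     lowered = answer.strip().lower()
--     # One left-to-right pass over positions: at each position, test whether
--     # any phrase starts there (phrase-set scan per position, not per-phrase
--     # full substring searches).
--     return any(
--         lowered.startswith(phrase, i)
--         for i in range(len(lowered) + 1)
--         for phrase in negative_phrases
--     )
-- ===== Notes on version B (the rewrite author's own statement) =====
-- stated objective: alternative
-- what changed: Replaces eleven independent substring searches ('phrase in lowered' per phrase) with a single left-to-right pass over positions of the normalized string, testing at each position whether any phrase starts there.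
import Mathlib
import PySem

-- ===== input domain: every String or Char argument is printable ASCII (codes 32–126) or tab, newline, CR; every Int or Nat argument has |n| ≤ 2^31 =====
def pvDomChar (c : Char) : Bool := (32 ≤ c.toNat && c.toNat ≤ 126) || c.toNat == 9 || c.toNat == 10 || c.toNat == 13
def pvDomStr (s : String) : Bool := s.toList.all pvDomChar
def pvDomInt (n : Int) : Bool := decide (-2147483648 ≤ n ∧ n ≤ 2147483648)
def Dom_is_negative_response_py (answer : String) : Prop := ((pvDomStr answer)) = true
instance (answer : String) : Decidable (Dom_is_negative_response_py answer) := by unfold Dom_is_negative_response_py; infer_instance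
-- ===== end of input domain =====

-- B replaces the per-phrase substring searches of A by a single left-to-right pass
-- over the positions of the normalized string (alternative decomposition, same cost class).

-- the shared literal phrase list of both Pythons
def pvNegativePhrases : List String :=
  ["not covered", "not mentioned", "no information",
   "cannot find", "not available", "not provided",
   "does not contain", "i don't know", "i do not know",
   "not found in", "outside the scope"]

-- ===== PORT A =====
def is_negative_response_py (answer : String) : Bool :=
  let lowered := PySem.Str.lower (PySem.Str.strip answer)
  pvNegativePhrases.any (fun phrase => PySem.Str.isIn phrase lowered)

-- ===== PORT B =====
def is_negative_response_py_alt (answer : String) : Bool :=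
  let lowered := PySem.Str.lower (PySem.Str.strip answer)
  -- 'lowered.startswith(phrase, i)' with 0 ≤ i ≤ len(lowered) is exactly
  -- 'PySem.Chars.startswith (lowered.toList.drop i) phrase.toList' (exact there)
  (List.range (lowered.toList.length + 1)).any (fun i =>
    pvNegativePhrases.any (fun phrase =>
      PySem.Chars.startswith (lowered.toList.drop i) phrase.toList))

-- ===== PRECONDITION & SPEC =====
def Spec_is_negative_response_py (answer : String) (out : Bool) : Prop := out = is_negative_response_py_alt answer
instance (answer : String) (out : Bool) : Decidable (Spec_is_negative_response_py answer out) := by unfold Spec_is_negative_response_py; infer_instance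

-- ===== CLAIM (what is proved, stated in full; the proofs are below) =====
def Claim_equal_is_negative_response_py : Prop := ∀ (answer : String), Dom_is_negative_response_py answer → Spec_is_negative_response_py answer (is_negative_response_py answer)

-- ===== LEMMAS AND PROOFS =====

-- a phrase occurs somewhere in s  ↔  some position i ≤ |s| where some phrase is a prefix of s.drop i
theorem pv_key (s : List Char) (ps : List String) :
    (ps.any (fun p => PySem.Chars.isIn p.toList s))
    = ((List.range (s.length + 1)).any (fun i =>
        ps.any (fun p => PySem.Chars.startswith (s.drop i) p.toList))) := by
  apply Bool.eq_iff_iff.mpr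
  simp only [List.any_eq_true, List.mem_range, PySem.Chars.startswith_iff]
  constructor
  · rintro ⟨p, hp, hin⟩
    obtain ⟨j, hj⟩ := (PySem.Chars.exists_prefix_drop_iff_isIn p.toList s).mpr hin
    refine ⟨min j s.length, by omega, p, hp, ?_⟩
    rcases Nat.lt_or_ge s.length j with h | h
    · have h1 : s.drop j = [] := List.drop_eq_nil_of_le (Nat.le_of_lt h)
      have h2 : s.drop (min j s.length) = [] := List.drop_eq_nil_of_le (by omega)
      rw [h2]; rw [h1] at hj; exact hj
    · simpa [Nat.min_eq_left h] using hj
  · rintro ⟨i, _, p, hp, hpref⟩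
    exact ⟨p, hp, (PySem.Chars.exists_prefix_drop_iff_isIn p.toList s).mp ⟨i, hpref⟩⟩

-- ===== VERDICT (by name: the statement is the Claim_ definition above) =====
theorem is_negative_response_py_spec : Claim_equal_is_negative_response_py := by
  intro answer _
  unfold Spec_is_negative_response_py is_negative_response_py is_negative_response_py_alt
  exact pv_key _ pvNegativePhrases
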